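-- pv_equiv track=rewrite | github.com/Hungmh0205/PDScan_Python | pdscan/internal/match_finder.py | _token_match
-- ===== SOURCE A (Python) =====
-- def _token_match(line: str, token: str) -> bool:
--     """Improved token matching - look for whole words or patterns"""
--     line_lower = line.lower()
--     token_lower = token.lower()
--
--     # Exact word match
--     if f" {token_lower} " in f" {line_lower} ":
--         return True
--
--     # Pattern match (for connection strings, etc.)
--     if token_lower in line_lower:
--         # Additional validation for certain tokens
--         if token_lower in ["jdbc:", "mysql://", "postgresql://", "mongodb://", "redis://", "oracle://"]:
--             return "://" in line_lower or "jdbc:" in line_lower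
--         elif token_lower in ["/home/", "/var/", "c:\\", "d:\\", "/tmp/", "/usr/"]:
--             return any(path in line_lower for path in ["/", "\\"])
--         else:
--             return True
--
--     return False
-- ===== SOURCE B (Python) =====
-- def _token_match(line: str, token: str) -> bool:
--     return token.lower() in line.lower()
-- ===== Notes on version B (the rewrite author's own statement) =====
-- stated objective: simpler
-- what changed: All of A's branches (space-padded word match, substring match, URL-scheme and path special cases) provably reduce to one lowercased substring test, so B is a single 'token.lower() in line.lower()'.
import Mathlib
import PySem

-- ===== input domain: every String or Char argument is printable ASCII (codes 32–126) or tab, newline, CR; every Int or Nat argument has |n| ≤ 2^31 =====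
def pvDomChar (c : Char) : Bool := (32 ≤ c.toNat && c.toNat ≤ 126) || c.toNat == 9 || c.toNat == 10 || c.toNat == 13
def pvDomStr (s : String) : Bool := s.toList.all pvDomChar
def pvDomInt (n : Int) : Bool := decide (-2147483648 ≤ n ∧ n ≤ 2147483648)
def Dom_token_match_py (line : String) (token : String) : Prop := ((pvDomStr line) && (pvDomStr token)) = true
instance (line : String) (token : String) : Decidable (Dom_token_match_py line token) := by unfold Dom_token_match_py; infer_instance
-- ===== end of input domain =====

-- B collapses A's branches to one lowercased substring test; the equivalence theorem below proves the branches were redundant.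

-- ===== PORT A =====
-- Literal transliteration of A on the List Char side (PySem.Chars.* are the exact
-- semantics of str.lower and the 'in' substring / list-membership tests; f" {x} "
-- is ' ' :: x ++ [' ']).  pvBranchA is A's body after the two .lower() lines.
def pvBranchA (line_lower : List Char) (token_lower : List Char) : Bool :=
  if PySem.Chars.isIn (' ' :: token_lower ++ [' ']) (' ' :: line_lower ++ [' ']) then
    true
  else if PySem.Chars.isIn token_lower line_lower then
    if token_lower ∈ ["jdbc:".toList, "mysql://".toList, "postgresql://".toList,
                      "mongodb://".toList, "redis://".toList, "oracle://".toList] then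
      PySem.Chars.isIn "://".toList line_lower || PySem.Chars.isIn "jdbc:".toList line_lower
    else if token_lower ∈ ["/home/".toList, "/var/".toList, "c:\\".toList,
                           "d:\\".toList, "/tmp/".toList, "/usr/".toList] then
      ["/".toList, "\\".toList].any (fun path => PySem.Chars.isIn path line_lower)
    else
      true
  else
    false

def token_match_py (line : String) (token : String) : Bool :=
  pvBranchA (PySem.Chars.lower line.toList) (PySem.Chars.lower token.toList)

-- ===== PORT B =====
def token_match_py_alt (line : String) (token : String) : Bool :=
  PySem.Str.isIn (PySem.Str.lower token) (PySem.Str.lower line)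

-- ===== PRECONDITION & SPEC =====
def Spec_token_match_py (line : String) (token : String) (out : Bool) : Prop := out = token_match_py_alt line token
instance (line : String) (token : String) (out : Bool) : Decidable (Spec_token_match_py line token out) := by unfold Spec_token_match_py; infer_instance

-- ===== CLAIM (what is proved, stated in full; the proofs are below) =====
def Claim_equal_token_match_py : Prop := ∀ (line : String) (token : String), Dom_token_match_py line token → Spec_token_match_py line token (token_match_py line token)

-- ===== LEMMAS AND PROOFS =====

-- If " t " occurs in " l ", then t occurs in l: the padded occurrence cannot use
-- either padding space, because t's own padding spaces occupy them.
lemma unpad_infix (t l : List Char) (h : (' ' :: t ++ [' ']) <:+: (' ' :: l ++ [' '])) :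
    t <:+: l := by
  rcases h with ⟨pre, post, hE⟩
  have key : ∀ (a : List Char), (a ++ t) ++ (' ' :: post) = l ++ [' '] → t <:+: l := by
    intro a hEq
    have hne : (' ' :: post) ≠ ([] : List Char) := by simp
    have hsplit : ' ' :: post = (' ' :: post).dropLast ++ [(' ' :: post).getLast hne] :=
      (List.dropLast_append_getLast hne).symm
    rw [hsplit, ← List.append_assoc] at hEq
    have := List.append_inj' hEq (by simp)
    have hl : (a ++ t) ++ (' ' :: post).dropLast = l := this.1
    exact ⟨a, (' ' :: post).dropLast, by simpa using hl⟩
  cases pre with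
  | nil =>
      simp only [List.nil_append, List.cons_append, List.cons.injEq] at hE
      exact key [] (by simpa [List.append_assoc] using hE.2)
  | cons c p =>
      simp only [List.cons_append, List.cons.injEq] at hE
      have : (p ++ (' ' :: t ++ [' '])) ++ post = l ++ [' '] := by
        simpa [List.append_assoc] using hE.2
      exact key (p ++ [' ']) (by simpa [List.append_assoc] using this)

-- The whole of A's branch structure computes the plain substring test.
lemma core (t l : List Char) : pvBranchA l t = PySem.Chars.isIn t l := by
  unfold pvBranchA
  by_cases h1 : PySem.Chars.isIn (' ' :: t ++ [' ']) (' ' :: l ++ [' ']) = true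
  · have h2 : PySem.Chars.isIn t l = true :=
      (PySem.Chars.isIn_iff_infix _ _).2 (unpad_infix t l ((PySem.Chars.isIn_iff_infix _ _).1 h1))
    rw [if_pos h1, h2]
  · rw [if_neg h1]
    by_cases h2 : PySem.Chars.isIn t l = true
    · have htl := (PySem.Chars.isIn_iff_infix _ _).1 h2
      rw [if_pos h2, h2]
      by_cases hurl : t ∈ ["jdbc:".toList, "mysql://".toList, "postgresql://".toList,
                      "mongodb://".toList, "redis://".toList, "oracle://".toList]
      · fin_cases hurl <;> rw [if_pos (by decide)] <;>
          simp only [Bool.or_eq_true] <;>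
          first
            | (exact Or.inr h2)
            | (exact Or.inl ((PySem.Chars.isIn_iff_infix _ _).2
                 (List.IsInfix.trans (by decide) htl)))
      · by_cases hpath : t ∈ ["/home/".toList, "/var/".toList, "c:\\".toList,
                           "d:\\".toList, "/tmp/".toList, "/usr/".toList]
        · fin_cases hpath <;> rw [if_neg (by decide), if_pos (by decide)] <;>
            simp only [List.any, Bool.or_eq_true] <;>
            first
              | (exact Or.inl ((PySem.Chars.isIn_iff_infix "/".toList l).2 (List.IsInfix.trans (by decide) htl)))
              | (exact Or.inr (Or.inl ((PySem.Chars.isIn_iff_infix "\\".toList l).2 (List.IsInfix.trans (by decide) htl))))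
        · rw [if_neg (by simpa using hurl), if_neg (by simpa using hpath)]
    · rw [if_neg h2, Bool.not_eq_true] at *
      rw [h2]

-- ===== VERDICT (by name: the statement is the Claim_ definition above) =====
theorem token_match_py_spec : Claim_equal_token_match_py := by
  intro line token _
  unfold Spec_token_match_py token_match_py_alt token_match_py
  rw [core]
  simp [PySem.Str.isIn, PySem.Str.toList_lower]
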